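-- pv_equiv track=rewrite | github.com/poleonia/Experiments-for-Paper-1- | matrix_problems_cpu_for_loop_solutions.py | solve_problem_009_cpu
-- ===== SOURCE A (Python) =====
-- def solve_problem_009_cpu(A, B):
--     result = []
--     for i in range(len(A)):
--         row_sum = sum(A[i])
--         row = []
--         for j in range(len(B[0])):
--             col_max = max(B[k][j] for k in range(len(B)))
--             row.append(row_sum + col_max)
--         result.append(row)
--     return result
-- ===== SOURCE B (Python) =====
-- def solve_problem_009_cpu(A, B):
--     if not A:
--         return []
--     col_maxes = [max(row[j] for row in B) for j in range(len(B[0]))]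
--     return [[sum(row) + c for c in col_maxes] for row in A]
-- ===== Notes on version B (the rewrite author's own statement) =====
-- stated objective: faster
-- what changed: B precomputes the column maxima of B once and the row sums once, then combines them by comprehension, instead of recomputing every column maximum inside every row of A.
import Mathlib
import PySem

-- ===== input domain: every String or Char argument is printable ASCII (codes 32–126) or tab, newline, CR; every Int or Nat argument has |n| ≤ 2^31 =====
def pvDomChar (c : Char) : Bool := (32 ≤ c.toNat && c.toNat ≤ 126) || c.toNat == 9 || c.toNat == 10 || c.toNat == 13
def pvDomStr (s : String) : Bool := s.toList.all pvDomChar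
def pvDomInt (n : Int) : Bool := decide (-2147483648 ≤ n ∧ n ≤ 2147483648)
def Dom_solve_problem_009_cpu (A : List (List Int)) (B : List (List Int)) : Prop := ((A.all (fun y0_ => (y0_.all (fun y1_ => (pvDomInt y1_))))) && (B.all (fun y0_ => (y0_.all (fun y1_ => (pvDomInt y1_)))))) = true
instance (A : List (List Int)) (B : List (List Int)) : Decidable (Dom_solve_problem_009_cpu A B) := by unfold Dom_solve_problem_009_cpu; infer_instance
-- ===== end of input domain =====

-- B precomputes B's column maxima once and reuses them for every row of A (asymptotically faster than A's per-entry recomputation).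


-- ===== PORT A =====
def solve_problem_009_cpu (A : List (List Int)) (B : List (List Int)) : List (List Int) :=
  (PySem.List.pyRange 0 (A.length : Int) 1).foldl (fun result i =>
    let row_sum := (PySem.List.pyGetD A i []).sum
    let row := (PySem.List.pyRange 0 ((PySem.List.pyGetD B 0 []).length : Int) 1).foldl (fun row j =>
      let col_max := (PySem.List.max?
        ((PySem.List.pyRange 0 (B.length : Int) 1).map
          (fun k => PySem.List.pyGetD (PySem.List.pyGetD B k []) j 0)) (fun y => y)).getD 0
      row ++ [row_sum + col_max]) []
    result ++ [row]) []

-- ===== PORT B =====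
def solve_problem_009_cpu_alt (A : List (List Int)) (B : List (List Int)) : List (List Int) :=
  if A = [] then []
  else
    let colMaxes := (PySem.List.pyRange 0 ((PySem.List.pyGetD B 0 []).length : Int) 1).map
      (fun j => (PySem.List.max? (B.map (fun row => PySem.List.pyGetD row j 0)) (fun y => y)).getD 0)
    A.map (fun row => colMaxes.map (fun c => row.sum + c))

-- ===== PRECONDITION & SPEC =====
-- Pre_ excludes exactly the inputs where Python A raises an IndexError/ValueError:
-- A nonempty with B empty (B[0]), or some row of B shorter than B's first row (B[k][j]).
def Pre_solve_problem_009_cpu (A : List (List Int)) (B : List (List Int)) : Prop :=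
  A = [] ∨ (B ≠ [] ∧ ∀ row ∈ B, (B.headD []).length ≤ row.length)
instance (A : List (List Int)) (B : List (List Int)) : Decidable (Pre_solve_problem_009_cpu A B) := by unfold Pre_solve_problem_009_cpu; infer_instance
def pvWitness_solve_problem_009_cpu : List (List Int) × List (List Int) := ([[1, 2], [3]], [[4, 5], [0, 7]])
def Spec_solve_problem_009_cpu (A : List (List Int)) (B : List (List Int)) (out : List (List Int)) : Prop := out = solve_problem_009_cpu_alt A B
instance (A : List (List Int)) (B : List (List Int)) (out : List (List Int)) : Decidable (Spec_solve_problem_009_cpu A B out) := by unfold Spec_solve_problem_009_cpu; infer_instance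

-- ===== CLAIM (what is proved, stated in full; the proofs are below) =====
def Claim_equal_solve_problem_009_cpu : Prop := ∀ (A : List (List Int)) (B : List (List Int)), Dom_solve_problem_009_cpu A B → Pre_solve_problem_009_cpu A B → Spec_solve_problem_009_cpu A B (solve_problem_009_cpu A B)

-- ===== LEMMAS AND PROOFS =====

-- A's column maximum (indices over range(len(B))) equals B's (direct iteration over the rows of B).
lemma colmax_eq (B : List (List Int)) (j : Int) :
    (PySem.List.pyRange 0 (B.length : Int) 1).map
        (fun k => PySem.List.pyGetD (PySem.List.pyGetD B k []) j 0)
      = B.map (fun row => PySem.List.pyGetD row j 0) := by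
  calc (PySem.List.pyRange 0 (B.length : Int) 1).map
          (fun k => PySem.List.pyGetD (PySem.List.pyGetD B k []) j 0)
      = ((PySem.List.pyRange 0 (B.length : Int) 1).map
          (fun k => PySem.List.pyGetD B k [])).map (fun row => PySem.List.pyGetD row j 0) := by
        rw [List.map_map]; rfl
    _ = B.map (fun row => PySem.List.pyGetD row j 0) := by
        rw [PySem.List.map_pyGetD_pyRange_zero' (xs := B) (d := ([] : List Int))]

-- ===== VERDICT (by name: the statement is the Claim_ definition above) =====
theorem solve_problem_009_cpu_spec : Claim_equal_solve_problem_009_cpu := by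
  intro A B _ _
  unfold Spec_solve_problem_009_cpu solve_problem_009_cpu solve_problem_009_cpu_alt
  rcases eq_or_ne A [] with hA | hA
  · subst hA; simp [PySem.List.pyRange_zero_nat]
  · rw [if_neg hA]
    dsimp only
    -- outer loop: fold over range(len(A)) reading A[i]  =  map over A
    rw [PySem.List.foldl_pyRange_zero_pyGetD' A ([] : List Int)
      (fun result r =>
        result ++ [(PySem.List.pyRange 0 ((PySem.List.pyGetD B 0 []).length : Int) 1).foldl
          (fun row j =>
            row ++ [r.sum + (PySem.List.max?
              ((PySem.List.pyRange 0 (B.length : Int) 1).map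
                (fun k => PySem.List.pyGetD (PySem.List.pyGetD B k []) j 0)) (fun y => y)).getD 0]) []])
      []]
    rw [PySem.List.foldl_append_singleton_eq_map]
    simp only [List.nil_append]
    apply List.map_congr_left
    intro r _
    -- inner loop: append-fold over range(len(B[0]))  =  map
    rw [PySem.List.foldl_append_singleton_eq_map]
    simp only [List.nil_append, List.map_map, Function.comp_def, colmax_eq]
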